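-- pv_equiv track=rewrite | github.com/keon/algorithms | algorithms/matrix/copy_transform.py | bottom_left_invert
-- ===== SOURCE A (Python) =====
-- def bottom_left_invert(matrix: list[list[int]]) -> list[list[int]]:
--     """Anti-transpose a matrix (reflect over the anti-diagonal).
--
--     Args:
--         matrix: 2D list of integers.
--
--     Returns:
--         Anti-transposed matrix.
--
--     Examples:
--         >>> bottom_left_invert([[1, 2, 3], [4, 5, 6], [7, 8, 9]])
--         [[9, 6, 3], [8, 5, 2], [7, 4, 1]]
--     """
--     result: list[list[int]] = []
--     for row in reversed(matrix):
--         for i, elem in enumerate(reversed(row)):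
--             try:
--                 result[i].append(elem)
--             except IndexError:
--                 result.insert(i, [])
--                 result[i].append(elem)
--     return result
-- ===== SOURCE B (Python) =====
-- def bottom_left_invert(matrix: list[list[int]]) -> list[list[int]]:
--     maxlen = max((len(row) for row in matrix), default=0)
--     return [[row[len(row) - 1 - i] for row in reversed(matrix) if len(row) > i]
--             for i in range(maxlen)]
-- ===== Notes on version B (the rewrite author's own statement) =====
-- stated objective: idiomatic
-- what changed: B inverts A's loop nesting: instead of growing output rows by appending one element per input row inside a try/except, B computes the max row length and builds each output row i directly by indexing row[len(row)-1-i] across the rows bottom-to-top.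
import Mathlib
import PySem

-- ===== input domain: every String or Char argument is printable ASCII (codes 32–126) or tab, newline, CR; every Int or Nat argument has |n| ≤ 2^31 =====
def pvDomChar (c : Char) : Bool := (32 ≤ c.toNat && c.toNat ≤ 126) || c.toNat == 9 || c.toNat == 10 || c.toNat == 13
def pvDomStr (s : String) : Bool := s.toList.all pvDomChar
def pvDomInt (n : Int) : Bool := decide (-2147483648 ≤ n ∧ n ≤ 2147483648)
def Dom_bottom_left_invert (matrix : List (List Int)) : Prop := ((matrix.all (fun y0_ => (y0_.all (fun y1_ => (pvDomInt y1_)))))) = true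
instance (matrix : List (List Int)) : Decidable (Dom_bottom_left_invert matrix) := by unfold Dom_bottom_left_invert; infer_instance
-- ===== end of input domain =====

-- B inverts A's loop nesting (outer over output-row index, inner over rows) for a plainer build; same asymptotic cost ("idiomatic").

-- ===== PORT A =====
-- try: result[i].append(elem)  except IndexError: result.insert(i, []); result[i].append(elem)
def pvTryAppend (res : List (List Int)) (i : Nat) (e : Int) : List (List Int) :=
  match res[i]? with
  | some r => res.set i (r ++ [e])
  | none =>
    let res' := PySem.List.insert res (i : Int) []
    match res'[i]? with
    | some r => res'.set i (r ++ [e])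
    | none => res'   -- unreachable: the loop keeps i ≤ res.length, so after the insert index i exists

-- for i, elem in enumerate(reversed(row)): …  (i is the running index)
def pvInnerLoop (res : List (List Int)) (i : Nat) : List Int → List (List Int)
  | [] => res
  | e :: rest => pvInnerLoop (pvTryAppend res i e) (i + 1) rest

def bottom_left_invert (matrix : List (List Int)) : List (List Int) :=
  matrix.reverse.foldl (fun res row => pvInnerLoop res 0 row.reverse) []

-- ===== PORT B =====
-- maxlen = max((len(row) for row in matrix), default=0)
-- [[row[len(row)-1-i] for row in reversed(matrix) if len(row) > i] for i in range(maxlen)]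
-- (the guard makes the index len(row)-1-i in range, so getD's default is never used)
def bottom_left_invert_alt (matrix : List (List Int)) : List (List Int) :=
  let maxlen := matrix.foldl (fun m row => max m row.length) 0
  (List.range maxlen).map (fun i =>
    matrix.reverse.flatMap (fun row =>
      if i < row.length then [row.getD (row.length - 1 - i) 0] else []))

-- ===== PRECONDITION & SPEC =====
def Spec_bottom_left_invert (matrix : List (List Int)) (out : List (List Int)) : Prop := out = bottom_left_invert_alt matrix
instance (matrix : List (List Int)) (out : List (List Int)) : Decidable (Spec_bottom_left_invert matrix out) := by unfold Spec_bottom_left_invert; infer_instance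

-- ===== CLAIM (what is proved, stated in full; the proofs are below) =====
def Claim_equal_bottom_left_invert : Prop := ∀ (matrix : List (List Int)), Dom_bottom_left_invert matrix → Spec_bottom_left_invert matrix (bottom_left_invert matrix)

-- ===== LEMMAS AND PROOFS =====

lemma getD_map_range (n j : Nat) (f : Nat → List Int) :
    ((List.range n).map f).getD j [] = if j < n then f j else [] := by
  by_cases h : j < n
  · simp [List.getD_eq_getElem?_getD, h]
  · simp [List.getD_eq_getElem?_getD, h]

lemma map_range_getD (l : List (List Int)) :
    (List.range l.length).map (fun j => l.getD j []) = l := by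
  apply List.ext_getElem (by simp)
  intro i h1 h2
  simp [List.getD_eq_getElem?_getD, List.getElem?_eq_getElem h2]

-- the except-branch: at index i = length, the insert lands at the end
lemma tryAppend_len (res : List (List Int)) (e : Int) :
    pvTryAppend res res.length e = res ++ [[e]] := by
  unfold pvTryAppend
  rw [List.getElem?_eq_none (le_refl _)]
  rw [PySem.List.insert_natCast res res.length [] (le_refl _)]
  simp

lemma tryAppend_getD (res : List (List Int)) (i : Nat) (e : Int) (h : i ≤ res.length) (j : Nat) :
    (pvTryAppend res i e).getD j [] = res.getD j [] ++ (if j = i then [e] else []) := by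
  rcases Nat.lt_or_ge i res.length with hi | hi
  · unfold pvTryAppend
    rw [List.getElem?_eq_getElem hi]
    by_cases hj : j = i
    · subst hj
      simp [List.getD_eq_getElem?_getD, hi]
    · simp [List.getD_eq_getElem?_getD, List.getElem?_set_ne (by omega : i ≠ j), hj]
  · have hie : i = res.length := by omega
    subst hie
    rw [tryAppend_len]
    by_cases hj : j = res.length
    · subst hj
      simp [List.getD_eq_getElem?_getD]
    · rcases Nat.lt_or_ge j res.length with hlt | hge
      · simp [List.getD_eq_getElem?_getD, List.getElem?_append_left hlt, hj]
      · have hgt : res.length < j := by omega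
        simp [List.getD_eq_getElem?_getD, List.getElem?_append_right (by omega : res.length ≤ j),
          List.getElem?_eq_none, hj, (by omega : res.length ≤ j), show 1 ≤ j - res.length by omega]

lemma tryAppend_length (res : List (List Int)) (i : Nat) (e : Int) (h : i ≤ res.length) :
    (pvTryAppend res i e).length = max res.length (i + 1) := by
  rcases Nat.lt_or_ge i res.length with hi | hi
  · unfold pvTryAppend
    rw [List.getElem?_eq_getElem hi]
    simp; omega
  · have hie : i = res.length := by omega
    subst hie
    rw [tryAppend_len]
    simp

lemma innerLoop_spec : ∀ (r' : List Int) (res : List (List Int)) (i : Nat), i ≤ res.length →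
    pvInnerLoop res i r' = (List.range (max res.length (i + r'.length))).map
      (fun j => res.getD j [] ++ if i ≤ j ∧ j < i + r'.length then [r'.getD (j - i) 0] else []) := by
  intro r'
  induction r' with
  | nil =>
    intro res i h
    simp only [pvInnerLoop, List.length_nil, Nat.add_zero]
    rw [show max res.length i = res.length by omega]
    refine ((map_range_getD res).symm).trans ?_
    apply List.map_congr_left
    intro j _
    rw [if_neg (by omega)]
    simp
  | cons e rest ih =>
    intro res i h
    simp only [pvInnerLoop]
    rw [ih (pvTryAppend res i e) (i + 1) (by rw [tryAppend_length res i e h]; omega)]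
    rw [tryAppend_length res i e h]
    rw [show max (max res.length (i + 1)) (i + 1 + rest.length)
        = max res.length (i + (e :: rest).length) from by simp only [List.length_cons]; omega]
    apply List.map_congr_left
    intro j _
    rw [tryAppend_getD res i e h j]
    by_cases hj : j = i
    · subst hj
      have h1 : ¬(j + 1 ≤ j ∧ j < j + 1 + rest.length) := by omega
      have h2 : j ≤ j ∧ j < j + (e :: rest).length := by simp
      rw [if_neg h1, if_pos h2, if_pos rfl]
      simp
    · rcases Nat.lt_or_ge j i with hlt | hge
      · have h1 : ¬(i + 1 ≤ j ∧ j < i + 1 + rest.length) := by omega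
        have h2 : ¬(i ≤ j ∧ j < i + (e :: rest).length) := by
          simp only [List.length_cons]; omega
        rw [if_neg h1, if_neg h2, if_neg hj]
        simp
      · have hgt : i < j := by omega
        by_cases hub : j < i + 1 + rest.length
        · have h1 : i + 1 ≤ j ∧ j < i + 1 + rest.length := ⟨by omega, hub⟩
          have h2 : i ≤ j ∧ j < i + (e :: rest).length := by
            simp only [List.length_cons]; exact ⟨by omega, by omega⟩
          rw [if_pos h1, if_pos h2, if_neg hj]
          have hsub : j - i = (j - (i + 1)) + 1 := by omega
          rw [hsub, List.getD_cons_succ]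
          simp
        · have h1 : ¬(i + 1 ≤ j ∧ j < i + 1 + rest.length) := by omega
          have h2 : ¬(i ≤ j ∧ j < i + (e :: rest).length) := by
            simp only [List.length_cons]; omega
          rw [if_neg h1, if_neg h2, if_neg hj]
          simp

-- running max of the row lengths, and the fold-state characterisation pvG
def pvM (rs : List (List Int)) : Nat := rs.foldl (fun m row => max m row.length) 0

def pvG (rs : List (List Int)) : List (List Int) :=
  (List.range (pvM rs)).map (fun j =>
    rs.flatMap (fun row => if j < row.length then [row.reverse.getD j 0] else []))

lemma foldl_max_swap : ∀ (l : List (List Int)) (n m : Nat),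
    l.foldl (fun a row => max a row.length) (max n m)
      = max (l.foldl (fun a row => max a row.length) n) m := by
  intro l
  induction l with
  | nil => intro n m; simp
  | cons a l ih =>
    intro n m
    simp only [List.foldl_cons]
    rw [show max (max n m) a.length = max (max n a.length) m by omega, ih]

lemma pvM_append_singleton (rs : List (List Int)) (r : List Int) :
    pvM (rs ++ [r]) = max (pvM rs) r.length := by
  simp only [pvM, List.foldl_append, List.foldl_cons, List.foldl_nil]

lemma pvM_cons (a : List Int) (l : List (List Int)) :
    pvM (a :: l) = max (pvM l) a.length := by
  simp only [pvM, List.foldl_cons]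
  exact foldl_max_swap l 0 a.length

lemma pvM_reverse : ∀ (rs : List (List Int)), pvM rs.reverse = pvM rs := by
  intro rs
  induction rs with
  | nil => rfl
  | cons a l ih =>
    rw [List.reverse_cons, pvM_append_singleton, ih, pvM_cons]

lemma le_foldl_max (l : List (List Int)) :
    ∀ n, n ≤ l.foldl (fun m r => max m r.length) n := by
  induction l with
  | nil => intro n; simp
  | cons a l ih =>
    intro n
    simp only [List.foldl_cons]
    exact le_trans (by omega) (ih (max n a.length))

lemma mem_le_pvM : ∀ (rs : List (List Int)) (n : Nat) (row : List Int), row ∈ rs →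
    row.length ≤ rs.foldl (fun m r => max m r.length) n := by
  intro rs
  induction rs with
  | nil => intro n row h; simp at h
  | cons a l ih =>
    intro n row h
    rcases List.mem_cons.mp h with h | h
    · subst h
      simp only [List.foldl_cons]
      exact le_trans (by omega) (le_foldl_max l (max n row.length))
    · exact ih _ row h

lemma flatMap_nil_of_ge (rs : List (List Int)) (j : Nat) (h : pvM rs ≤ j) :
    rs.flatMap (fun row => if j < row.length then [row.reverse.getD j 0] else []) = [] := by
  rw [List.flatMap_eq_nil_iff]
  intro row hrow
  rw [if_neg]
  have := mem_le_pvM rs 0 row hrow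
  simp only [pvM] at h
  omega

lemma pvG_getD (rs : List (List Int)) (j : Nat) :
    (pvG rs).getD j []
      = rs.flatMap (fun row => if j < row.length then [row.reverse.getD j 0] else []) := by
  rw [pvG, getD_map_range]
  by_cases h : j < pvM rs
  · simp [h]
  · rw [if_neg h, flatMap_nil_of_ge rs j (by omega)]

lemma pvG_length (rs : List (List Int)) : (pvG rs).length = pvM rs := by
  simp [pvG]

lemma outer_inv : ∀ (rs : List (List Int)),
    rs.foldl (fun res row => pvInnerLoop res 0 row.reverse) [] = pvG rs := by
  intro rs
  induction rs using List.reverseRecOn with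
  | nil => rfl
  | append_singleton rs r ih =>
    rw [List.foldl_append, List.foldl_cons, List.foldl_nil, ih,
      innerLoop_spec r.reverse (pvG rs) 0 (Nat.zero_le _)]
    simp only [pvG_length, List.length_reverse, Nat.zero_add, Nat.zero_le, true_and, Nat.sub_zero]
    rw [show pvG (rs ++ [r]) = (List.range (max (pvM rs) r.length)).map
        (fun j => (rs ++ [r]).flatMap
          (fun row => if j < row.length then [row.reverse.getD j 0] else [])) from by
      rw [pvG, pvM_append_singleton]]
    apply List.map_congr_left
    intro j _
    rw [pvG_getD rs j, List.flatMap_append]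
    simp

lemma getD_reverse_of_lt (row : List Int) (i : Nat) (h : i < row.length) :
    row.reverse.getD i 0 = row.getD (row.length - 1 - i) 0 := by
  rw [List.getD_eq_getElem?_getD, List.getD_eq_getElem?_getD, List.getElem?_reverse h]

-- ===== VERDICT (by name: the statement is the Claim_ definition above) =====
theorem bottom_left_invert_spec : Claim_equal_bottom_left_invert := by
  intro matrix _
  unfold Spec_bottom_left_invert bottom_left_invert bottom_left_invert_alt
  rw [outer_inv matrix.reverse, pvG, pvM_reverse]
  show (List.range (pvM matrix)).map _ = (List.range (pvM matrix)).map _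
  apply List.map_congr_left
  intro i _
  have hfun : (fun (row : List Int) => if i < row.length then [row.reverse.getD i 0] else [])
      = (fun (row : List Int) => if i < row.length then [row.getD (row.length - 1 - i) 0] else []) := by
    funext row
    by_cases h : i < row.length
    · rw [if_pos h, if_pos h, getD_reverse_of_lt row i h]
    · rw [if_neg h, if_neg h]
  rw [hfun]
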